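-- pv_equiv track=rewrite | github.com/GunalanD95/DSA-Problems | Arrays/SubArray/AlternateSubArray.py | AlternateSubArrayB
-- ===== SOURCE A (Python) =====
-- def AlternateSubArrayB(A,B):
--     N = len(A)
--
--     if B <= 0:
--         return list(range(N))                  # If B is 0, return all the indices of the array
--
--     B = 2 * B + 1                              # B is the length of the subarray
--
--
--     res = []
--     for i in range(N):                         # Iterate over the array
--         s = A[i]                               # s is the current element
--         count = 0                              # initialize count
--         for j in range(i,min(i+B,N)):          # Iterate over the subarray of length B
--             if s == A[j]:                      # If the element is same as the current element
--                 count += 1                     # Increment the count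
--             s = 1 - s                          # Flip the element to 1 - s , so that we can check the next element in the subarray
--
--         if count == B:                         # If the count is equal to B, then we have found the alternate subarray
--             res.append(i+B//2)
--     return res
-- ===== SOURCE B (Python) =====
-- def AlternateSubArrayB(A, B):
--     # One backward pass: run[i] = length of the maximal alternating run starting at i;
--     # a center exists at i+B exactly when run[i] >= 2*B+1.  O(N) instead of O(N*B).
--     n = len(A)
--     if B <= 0:
--         return list(range(n))
--     L = 2 * B + 1
--     run = [1] * n
--     for i in range(n - 2, -1, -1):
--         if A[i + 1] == 1 - A[i]:
--             run[i] = run[i + 1] + 1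
--     return [i + B for i, r in enumerate(run) if r >= L]
-- ===== Notes on version B (the rewrite author's own statement) =====
-- stated objective: faster
-- what changed: Replaced A's per-index re-scan of a (2B+1)-wide window by a single backward pass that precomputes the alternating-run length starting at each index, then emits i+B wherever that run length is at least 2B+1.
import Mathlib
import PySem

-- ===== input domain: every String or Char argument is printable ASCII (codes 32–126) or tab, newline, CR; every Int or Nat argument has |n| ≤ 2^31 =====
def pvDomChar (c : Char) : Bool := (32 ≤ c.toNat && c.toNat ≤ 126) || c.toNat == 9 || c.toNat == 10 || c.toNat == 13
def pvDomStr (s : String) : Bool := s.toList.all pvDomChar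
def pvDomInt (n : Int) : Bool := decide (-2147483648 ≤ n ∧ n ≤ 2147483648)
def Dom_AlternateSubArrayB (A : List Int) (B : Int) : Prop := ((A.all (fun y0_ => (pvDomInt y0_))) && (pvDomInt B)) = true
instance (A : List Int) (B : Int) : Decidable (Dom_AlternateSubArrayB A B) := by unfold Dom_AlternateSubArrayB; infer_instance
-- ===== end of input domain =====

-- B replaces A's O(N*B) per-index window re-scan by one O(N) backward pass computing the
-- alternating-run length starting at each index; same return value on every input.

-- ===== PORT A =====
def AlternateSubArrayB (A : List Int) (B : Int) : List Int :=
  let N : Int := A.length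
  if B ≤ 0 then
    PySem.List.pyRange 0 N 1
  else
    let B' : Int := 2 * B + 1
    (PySem.List.pyRange 0 N 1).foldl
      (fun res i =>
        let sc := (PySem.List.pyRange i (min (i + B') N) 1).foldl
          (fun (p : Int × Int) j =>
            (1 - p.1, if p.1 = PySem.List.pyGetD A j 0 then p.2 + 1 else p.2))
          (PySem.List.pyGetD A i 0, 0)
        if sc.2 = B' then res ++ [i + PySem.Int.floordiv B' 2] else res)
      []

-- ===== PORT B =====
-- run[i] (backward pass of Source B): length of the maximal alternating run starting at i
def pvAltRuns : List Int → List Nat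
  | [] => []
  | [_] => [1]
  | a :: b :: t =>
    let r := pvAltRuns (b :: t)
    (if b = 1 - a then r.headD 0 + 1 else 1) :: r

def AlternateSubArrayB_alt (A : List Int) (B : Int) : List Int :=
  if B ≤ 0 then
    PySem.List.pyRange 0 (A.length : Int) 1
  else
    let L : Int := 2 * B + 1
    (PySem.List.enumerate (pvAltRuns A) 0).filterMap
      (fun p => if L ≤ (p.2 : Int) then some (p.1 + B) else none)

-- ===== PRECONDITION & SPEC =====
def Spec_AlternateSubArrayB (A : List Int) (B : Int) (out : List Int) : Prop := out = AlternateSubArrayB_alt A B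
instance (A : List Int) (B : Int) (out : List Int) : Decidable (Spec_AlternateSubArrayB A B out) := by unfold Spec_AlternateSubArrayB; infer_instance

-- ===== CLAIM (what is proved, stated in full; the proofs are below) =====
def Claim_equal_AlternateSubArrayB : Prop := ∀ (A : List Int) (B : Int), Dom_AlternateSubArrayB A B → Spec_AlternateSubArrayB A B (AlternateSubArrayB A B)

-- ===== LEMMAS AND PROOFS =====

-- flip applied k times to x
def pvFlip (k : Nat) (x : Int) : Int := if k % 2 = 0 then x else 1 - x

-- chain length of the alternating run starting at the head
def pvC : List Int → Nat
  | [] => 0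
  | [_] => 1
  | a :: b :: t => if b = 1 - a then pvC (b :: t) + 1 else 1

lemma pvFlip_succ (k : Nat) (s : Int) : pvFlip k (1 - s) = pvFlip (k + 1) s := by
  unfold pvFlip
  rcases Nat.even_or_odd k with h | h
  · simp [Nat.even_iff.mp h, Nat.succ_mod_two_eq_one_iff.mpr (Nat.even_iff.mp h)]
  · have hk : k % 2 = 1 := Nat.odd_iff.mp h
    simp only [hk, Nat.succ_mod_two_eq_zero_iff.mpr hk]
    norm_num

lemma pvFlip_one_sub (k : Nat) (s : Int) : 1 - pvFlip k s = pvFlip (k + 1) s := by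
  unfold pvFlip
  rcases Nat.even_or_odd k with h | h
  · simp [Nat.even_iff.mp h, Nat.succ_mod_two_eq_one_iff.mpr (Nat.even_iff.mp h)]
  · have hk : k % 2 = 1 := Nat.odd_iff.mp h
    simp only [hk, Nat.succ_mod_two_eq_zero_iff.mpr hk]
    norm_num

lemma pvAltRuns_length (l : List Int) : (pvAltRuns l).length = l.length := by
  induction l with
  | nil => rfl
  | cons a t ih =>
    cases t with
    | nil => rfl
    | cons b r => simp [pvAltRuns] at ih ⊢; omega

lemma pvAltRuns_headD (l : List Int) : (pvAltRuns l).headD 0 = pvC l := by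
  induction l with
  | nil => rfl
  | cons a t ih =>
    cases t with
    | nil => rfl
    | cons b r => simp [pvAltRuns, pvC] at ih ⊢; rw [ih]

lemma pvAltRuns_getD (l : List Int) (i : Nat) (hi : i < l.length) :
    (pvAltRuns l).getD i 0 = pvC (l.drop i) := by
  induction l generalizing i with
  | nil => simp at hi
  | cons a t ih =>
    cases i with
    | zero =>
      have hh := pvAltRuns_headD (a :: t)
      cases h : pvAltRuns (a :: t) with
      | nil =>
        have := pvAltRuns_length (a :: t)
        rw [h] at this
        simp at this
      | cons x xs =>
        rw [h] at hh
        simp at hh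
        simpa using hh
    | succ i =>
      cases t with
      | nil => simp at hi
      | cons b r =>
        have hstep : pvAltRuns (a :: b :: r) =
            (if b = 1 - a then (pvAltRuns (b :: r)).headD 0 + 1 else 1) :: pvAltRuns (b :: r) := rfl
        rw [hstep]
        have hi' : i < (b :: r).length := by simp at hi ⊢; omega
        simpa using ih i hi'

lemma pvC_char (t : List Int) (L : Nat) :
    L ≤ pvC t ↔ L ≤ t.length ∧ ∀ k, k + 1 < L → t.getD (k + 1) 0 = 1 - t.getD k 0 := by
  induction t generalizing L with
  | nil =>
    simp [pvC]
    intro h; omega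
  | cons a t ih =>
    cases t with
    | nil =>
      constructor
      · intro h
        refine ⟨by simpa [pvC] using h, ?_⟩
        intro k hk
        have : pvC [a] = 1 := rfl
        omega
      · rintro ⟨h1, h2⟩
        have hL : L ≤ 1 := by simpa using h1
        simpa [pvC] using hL
    | cons b r =>
      by_cases hab : b = 1 - a
      · have hc : pvC (a :: b :: r) = pvC (b :: r) + 1 := by simp [pvC, hab]
        rw [hc]
        constructor
        · intro h
          rcases Nat.eq_zero_or_pos L with hL | hL
          · exact ⟨by omega, by intro k hk; omega⟩
          · have h' : L - 1 ≤ pvC (b :: r) := by omega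
            rcases (ih (L - 1)).mp h' with ⟨hlen, hlink⟩
            refine ⟨by simp at hlen ⊢; omega, ?_⟩
            intro k hk
            cases k with
            | zero => simpa using hab
            | succ k =>
              have := hlink k (by omega)
              simpa using this
        · rintro ⟨hlen, hlink⟩
          rcases Nat.eq_zero_or_pos L with hL | hL
          · omega
          · have h' : L - 1 ≤ pvC (b :: r) := by
              apply (ih (L - 1)).mpr
              refine ⟨by simp at hlen ⊢; omega, ?_⟩
              intro k hk
              have := hlink (k + 1) (by omega)
              simpa using this
            omega
      · have hc : pvC (a :: b :: r) = 1 := by simp [pvC, hab]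
        rw [hc]
        constructor
        · intro h
          refine ⟨by simp; omega, ?_⟩
          intro k hk; omega
        · rintro ⟨hlen, hlink⟩
          by_contra h
          have hL : 2 ≤ L := by omega
          have := hlink 0 (by omega)
          simp at this
          exact hab this

lemma pattern_iff_link (t : List Int) (L : Nat) :
    (∀ k, k < L → t.getD k 0 = pvFlip k (t.getD 0 0)) ↔
    (∀ k, k + 1 < L → t.getD (k + 1) 0 = 1 - t.getD k 0) := by
  constructor
  · intro h k hk
    have h1 := h (k + 1) hk
    have h2 := h k (by omega)
    rw [h1, h2, ← pvFlip_one_sub]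
  · intro h k hk
    induction k with
    | zero => simp [pvFlip]
    | succ k ihk =>
      have := h k hk
      rw [this, ihk (by omega)]
      exact pvFlip_one_sub k _

-- the inner loop of A: count of window positions matching the alternating pattern from s
lemma inner_fold (Ar : List Int) (w : Nat) :
    ∀ (n : Nat) (s c : Int),
    ((PySem.List.pyRange (n : Int) ((n : Int) + (w : Int)) 1).foldl
      (fun (p : Int × Int) j =>
        (1 - p.1, if p.1 = PySem.List.pyGetD Ar j 0 then p.2 + 1 else p.2))
      (s, c)).2
    = c + ((List.range w).countP (fun k => decide (Ar.getD (n + k) 0 = pvFlip k s)) : Int) := by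
  induction w with
  | zero =>
    intro n s c
    rw [PySem.List.pyRange_one_eq_nil (by omega)]
    simp
  | succ w ih =>
    intro n s c
    rw [PySem.List.pyRange_one_cons (by push_cast; omega)]
    simp only [List.foldl_cons]
    have hcast : ((n : Int) + 1) = ((n + 1 : Nat) : Int) := by push_cast; ring
    have hcast2 : ((n : Int) + ((w : Nat) + 1 : Nat)) = ((n + 1 : Nat) : Int) + (w : Int) := by
      push_cast; ring
    rw [hcast2, hcast, ih (n + 1) (1 - s) _]
    have hrange : (List.range (w + 1)).countP
        (fun k => decide (Ar.getD (n + k) 0 = pvFlip k s))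
      = ((if Ar.getD n 0 = pvFlip 0 s then 1 else 0) +
        (List.range w).countP (fun k => decide (Ar.getD (n + 1 + k) 0 = pvFlip k (1 - s)))) := by
      rw [List.range_succ_eq_map]
      rw [List.countP_cons, List.countP_map]
      have : ∀ k, (fun k => decide (Ar.getD (n + k) 0 = pvFlip k s)) (k + 1)
          = decide (Ar.getD (n + 1 + k) 0 = pvFlip k (1 - s)) := by
        intro k
        simp only [pvFlip_succ]
        congr 1
        · congr 2; omega
      rw [show ((fun k => decide (Ar.getD (n + k) 0 = pvFlip k s)) ∘ Nat.succ)
            = (fun k => decide (Ar.getD (n + 1 + k) 0 = pvFlip k (1 - s))) from funext fun k => by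
              simpa using this k]
      simp [pvFlip]
      omega
    rw [hrange]
    have hget : PySem.List.pyGetD Ar (n : Int) 0 = Ar.getD n 0 := PySem.List.pyGetD_natCast ..
    have hiff : (Ar.getD n 0 = pvFlip 0 s) ↔ (s = PySem.List.pyGetD Ar (n : Int) 0) := by
      rw [hget]; unfold pvFlip; simp [eq_comm]
    by_cases hs : s = PySem.List.pyGetD Ar (n : Int) 0
    · rw [if_pos hs, if_pos (hiff.mpr hs)]
      push_cast; ring
    · rw [if_neg hs, if_neg (fun hx => hs (hiff.mp hx))]
      push_cast; ring

-- a generic filterMap-of-if is filter-then-map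
lemma filterMap_if {α β : Type} (l : List α) (p : α → Prop) [DecidablePred p] (f : α → β) :
    l.filterMap (fun x => if p x then some (f x) else none)
      = (l.filter (fun x => decide (p x))).map f := by
  induction l with
  | nil => rfl
  | cons a t ih =>
    by_cases h : p a
    · simp [h, ih]
    · simp [h, ih]

lemma getD_drop (l : List Int) (n k : Nat) :
    (l.drop n).getD k 0 = l.getD (n + k) 0 := by
  simp [List.getD_eq_getElem?_getD, List.getElem?_drop]

lemma fdiv_odd (B : Int) : PySem.Int.floordiv (2 * B + 1) 2 = B := by
  rw [PySem.Int.floordiv_eq_ediv_of_pos (by omega)]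
  omega

-- the pointwise condition equivalence at index n < A.length
lemma cond_iff (Ar : List Int) (B : Int) (hB : 0 < B) (n : Nat) (hn : n < Ar.length) :
    (((PySem.List.pyRange (n : Int) (min ((n : Int) + (2 * B + 1)) (Ar.length : Int)) 1).foldl
        (fun (p : Int × Int) j =>
          (1 - p.1, if p.1 = PySem.List.pyGetD Ar j 0 then p.2 + 1 else p.2))
        (PySem.List.pyGetD Ar (n : Int) 0, 0)).2 = 2 * B + 1)
    ↔ ((2 * B + 1 : Int) ≤ ((pvAltRuns Ar).getD n 0 : Nat)) := by
  have hL : (0:Int) < 2 * B + 1 := by omega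
  set w : Nat := ((min ((n : Int) + (2 * B + 1)) (Ar.length : Int)) - (n : Int)).toNat with hw
  have hmin : min ((n : Int) + (2 * B + 1)) (Ar.length : Int) = (n : Int) + (w : Int) := by
    have h1 : (n : Int) ≤ min ((n : Int) + (2 * B + 1)) (Ar.length : Int) := by
      simp; constructor <;> omega
    omega
  have hwle : (w : Int) ≤ 2 * B + 1 := by omega
  rw [hmin, inner_fold Ar w n (PySem.List.pyGetD Ar (n : Int) 0) 0]
  rw [PySem.List.pyGetD_natCast]
  set s0 := Ar.getD n 0 with hs0
  set cnt := (List.range w).countP (fun k => decide (Ar.getD (n + k) 0 = pvFlip k s0)) with hcnt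
  have hcntle : cnt ≤ w := by
    have h := List.countP_le_length (p := fun k => decide (Ar.getD (n + k) 0 = pvFlip k s0))
      (l := List.range w)
    simpa using h
  rw [pvAltRuns_getD Ar n hn]
  set t := Ar.drop n with ht
  have htlen : t.length = Ar.length - n := by simp [ht]
  have htget : ∀ k, t.getD k 0 = Ar.getD (n + k) 0 := fun k => getD_drop Ar n k
  set Ln : Nat := (2 * B + 1).toNat with hLn
  have hLn' : (Ln : Int) = 2 * B + 1 := by omega
  have hchar := pvC_char t Ln
  have hpl := pattern_iff_link t Ln
  constructor
  · intro h
    have hcB : (cnt : Int) = 2 * B + 1 := by omega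
    have hwB : (w : Int) = 2 * B + 1 := by omega
    have hcw : cnt = w := by omega
    have hall : ∀ k, k < w → Ar.getD (n + k) 0 = pvFlip k s0 := by
      have hceq : (List.range w).countP (fun k => decide (Ar.getD (n + k) 0 = pvFlip k s0))
          = (List.range w).length := by
        simp only [List.length_range]
        omega
      have hmem := List.countP_eq_length.mp hceq
      intro k hk
      have h2 := hmem k (List.mem_range.mpr hk)
      simpa using h2
    have hwLn : w = Ln := by omega
    have hpat : ∀ k, k < Ln → t.getD k 0 = pvFlip k (t.getD 0 0) := by
      intro k hk
      have h0 : t.getD 0 0 = s0 := by rw [htget 0]; simp [hs0]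
      rw [h0, htget k]
      exact hall k (by omega)
    have hlink := hpl.mp hpat
    have : Ln ≤ pvC t := hchar.mpr ⟨by omega, hlink⟩
    omega
  · intro h
    have hLc : Ln ≤ pvC t := by omega
    rcases hchar.mp hLc with ⟨hlen, hlink⟩
    have hpat := hpl.mpr hlink
    have hwLn : w = Ln := by omega
    have hcw : cnt = w := by
      have hceq : (List.range w).countP (fun k => decide (Ar.getD (n + k) 0 = pvFlip k s0))
          = (List.range w).length := by
        apply List.countP_eq_length.mpr
        intro k hk
        have hk' : k < w := List.mem_range.mp hk
        have h0 : t.getD 0 0 = s0 := by rw [htget 0]; simp [hs0]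
        have hx := hpat k (by omega)
        rw [htget k, h0] at hx
        simpa using hx
      rw [hcnt, hceq]
      simp
    omega

-- ===== VERDICT (by name: the statement is the Claim_ definition above) =====
theorem AlternateSubArrayB_spec : Claim_equal_AlternateSubArrayB := by
  intro Ar B _
  unfold Spec_AlternateSubArrayB AlternateSubArrayB AlternateSubArrayB_alt
  by_cases hB : B ≤ 0
  · simp [hB]
  · simp only [if_neg hB]
    have hB' : 0 < B := by omega
    rw [PySem.List.foldl_append_ite
      (p := fun i => ((PySem.List.pyRange i (min (i + (2 * B + 1)) ((Ar.length : Int))) 1).foldl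
          (fun (p : Int × Int) j =>
            (1 - p.1, if p.1 = PySem.List.pyGetD Ar j 0 then p.2 + 1 else p.2))
          (PySem.List.pyGetD Ar i 0, 0)).2 = 2 * B + 1)
      (f := fun i => i + PySem.Int.floordiv (2 * B + 1) 2)]
    rw [PySem.List.enumerate_eq_map_pyRange (d := 0)]
    rw [List.filterMap_map]
    simp only [Function.comp, PySem.List.len_eq, pvAltRuns_length]
    rw [filterMap_if
      (p := fun j => (2 * B + 1 : Int) ≤ ((PySem.List.pyGetD (pvAltRuns Ar) j 0 : Nat) : Int))
      (f := fun j => j + B)]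
    simp only [List.nil_append]
    rw [fdiv_odd]
    apply congrArg (List.map fun j => j + B)
    apply List.filter_congr
    intro i hi
    obtain ⟨h0, hN⟩ := (PySem.List.mem_pyRange_one).mp hi
    lift i to Nat using h0 with n
    have hn : n < Ar.length := by exact_mod_cast hN
    simp only [decide_eq_decide]
    rw [PySem.List.pyGetD_natCast (pvAltRuns Ar) n 0]
    exact cond_iff Ar B hB' n hn
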